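-- pv_equiv track=rewrite | github.com/d8ahazard/overmind | app/api/routes/models.py | _pick_code
-- ===== SOURCE A (Python) =====
-- from typing import Dict, List, Optional
--
-- def _pick_code(models: List[str]) -> str | None:
--     if not models:
--         return None
--     priority = ["codex", "code", "gpt-5", "gpt-4.1", "gpt-4o", "gpt-4"]
--     for tag in priority:
--         match = next((m for m in models if tag in m.lower()), None)
--         if match:
--             return match
--     return models[0]
-- ===== SOURCE B (Python) =====
-- def _pick_code(models):
--     if not models:
--         return None
--     priority = ["codex", "code", "gpt-5", "gpt-4.1", "gpt-4o", "gpt-4"]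
--
--     def rank(m):
--         low = m.lower()
--         return next((i for i, tag in enumerate(priority) if tag in low), len(priority))
--
--     return min(models, key=rank)
-- ===== Notes on version B (the rewrite author's own statement) =====
-- stated objective: idiomatic
-- what changed: Replaced the outer loop over priority tags with per-tag scans of models by a single min(models, key=rank) where rank(m) is the index of the first priority tag contained in m.lower(); Python's min keeps the first model on ties and, when nothing matches, all ranks are equal so it returns models[0], subsuming A's fallback.
import Mathlib
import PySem

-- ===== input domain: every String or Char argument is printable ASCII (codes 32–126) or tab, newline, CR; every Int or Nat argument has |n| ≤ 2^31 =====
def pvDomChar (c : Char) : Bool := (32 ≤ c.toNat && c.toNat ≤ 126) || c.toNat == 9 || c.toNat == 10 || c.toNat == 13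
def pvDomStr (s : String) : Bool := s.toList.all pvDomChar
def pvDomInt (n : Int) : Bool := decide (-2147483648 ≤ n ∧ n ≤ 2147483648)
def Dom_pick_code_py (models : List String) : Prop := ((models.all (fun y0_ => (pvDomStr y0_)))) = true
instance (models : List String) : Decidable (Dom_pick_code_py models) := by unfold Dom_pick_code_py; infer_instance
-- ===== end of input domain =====

-- B replaces A's loop over priority tags (each pass scanning models) by a single min(models, key=priority-rank); idiomatic, same cost.

-- ===== PORT A =====
-- A's for-tag loop: try each tag in order (next(...) = find?, `if match:` string truthiness), fall through to models[0]
def pickLoopA (models : List String) : List String → Option String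
  | [] => PySem.List.pyGet? models 0
  | t :: ts =>
    match models.find? (fun m => PySem.Str.isIn t (PySem.Str.lower m)) with
    | some m => if m ≠ "" then some m else pickLoopA models ts
    | none => pickLoopA models ts

def pick_code_py (models : List String) : Option String :=
  if models = [] then none
  else pickLoopA models ["codex", "code", "gpt-5", "gpt-4.1", "gpt-4o", "gpt-4"]

-- ===== PORT B =====
-- rank(m) = next((i for i, tag in enumerate(priority) if tag in low), len(priority))
def rankB (priority : List String) (m : String) : Nat :=
  let low := PySem.Str.lower m
  (priority.findIdx? (fun tag => PySem.Str.isIn tag low)).getD priority.length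

-- min(models, key=rank)
def pick_code_py_alt (models : List String) : Option String :=
  if models = [] then none
  else
    let priority := ["codex", "code", "gpt-5", "gpt-4.1", "gpt-4o", "gpt-4"]
    PySem.List.min? models (rankB priority)

-- ===== PRECONDITION & SPEC =====
def Spec_pick_code_py (models : List String) (out : Option String) : Prop := out = pick_code_py_alt models
instance (models : List String) (out : Option String) : Decidable (Spec_pick_code_py models out) := by unfold Spec_pick_code_py; infer_instance

-- ===== CLAIM (what is proved, stated in full; the proofs are below) =====
def Claim_equal_pick_code_py : Prop := ∀ (models : List String), Dom_pick_code_py models → Spec_pick_code_py models (pick_code_py models)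

-- ===== LEMMAS AND PROOFS =====

theorem rankB_cons (t : String) (ts : List String) (m : String) :
    rankB (t :: ts) m =
      if PySem.Str.isIn t (PySem.Str.lower m) then 0 else rankB ts m + 1 := by
  simp only [rankB, List.findIdx?_cons, List.length_cons]
  split_ifs with h
  · simp
  · cases hfi : List.findIdx? (fun tag => PySem.Str.isIn tag (PySem.Str.lower m)) ts <;>
      simp_all

theorem min?_eq_foldl {α : Type} (key : α → Nat) (xs : List α) :
    PySem.List.min? xs key =
      xs.foldl (fun acc x =>
        match acc with
        | none => some x
        | some m => if key x < key m then some x else some m) none := rfl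

-- shifting all keys by +1 does not change min?
theorem min?_succ_key {α : Type} (key : α → Nat) (xs : List α) :
    PySem.List.min? xs (fun x => key x + 1) = PySem.List.min? xs key := by
  simp only [min?_eq_foldl]
  congr 1
  funext acc x
  cases acc with
  | none => rfl
  | some m => simp

-- once the accumulator holds an element of key 0, the fold never changes it
theorem foldl_keep_zero {α : Type} (key : α → Nat) (m : α) (hm : key m = 0) :
    ∀ (xs : List α),
      xs.foldl (fun acc x =>
        match acc with
        | none => some x
        | some m => if key x < key m then some x else some m) (some m) = some m := by
  intro xs
  induction xs with
  | nil => rfl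
  | cons x t ih => simpa [hm] using ih

-- if m₀ is the first element of key 0, min? returns it (invariant: the accumulator has nonzero key)
theorem min?_of_find?_zero {α : Type} (key : α → Nat) :
    ∀ (xs : List α) (acc : Option α) (m₀ : α),
      (∀ a, acc = some a → key a ≠ 0) →
      xs.find? (fun x => key x == 0) = some m₀ →
      xs.foldl (fun acc x =>
        match acc with
        | none => some x
        | some m => if key x < key m then some x else some m) acc = some m₀ := by
  intro xs
  induction xs with
  | nil => intro acc m₀ _ hf; simp at hf
  | cons x t ih =>
    intro acc m₀ hacc hf
    by_cases hx : key x = 0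
    · have hm0 : m₀ = x := by
        simp [hx] at hf; exact hf.symm
      subst hm0
      cases acc with
      | none => simpa using foldl_keep_zero key m₀ hx t
      | some m =>
        have hlt : key m₀ < key m := by have := hacc m rfl; omega
        simpa [hlt] using foldl_keep_zero key m₀ hx t
    · have hf' : t.find? (fun x => key x == 0) = some m₀ := by
        simpa [List.find?_cons, hx] using hf
      cases acc with
      | none => exact ih (some x) m₀ (by intro a ha; cases ha; exact hx) hf'
      | some m =>
        have hmne := hacc m rfl
        by_cases hlt : key x < key m
        · simpa [hlt] using ih (some x) m₀ (by intro a ha; cases ha; exact hx) hf'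
        · simpa [hlt] using ih (some m) m₀ (by intro a ha; cases ha; exact hmne) hf'

-- min? only looks at the keys of list members (and of the accumulator)
theorem min?_foldl_congr {α : Type} (key1 key2 : α → Nat) :
    ∀ (xs : List α) (acc : Option α),
      (∀ a, acc = some a → key1 a = key2 a) →
      (∀ x ∈ xs, key1 x = key2 x) →
      xs.foldl (fun acc x =>
        match acc with
        | none => some x
        | some m => if key1 x < key1 m then some x else some m) acc =
      xs.foldl (fun acc x =>
        match acc with
        | none => some x
        | some m => if key2 x < key2 m then some x else some m) acc := by
  intro xs
  induction xs with
  | nil => intro acc _ _; rfl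
  | cons x t ih =>
    intro acc hacc hmem
    have hx : key1 x = key2 x := hmem x (List.mem_cons_self ..)
    have hmem' : ∀ y ∈ t, key1 y = key2 y := fun y hy => hmem y (List.mem_cons_of_mem _ hy)
    cases acc with
    | none =>
      simp only [List.foldl_cons]
      exact ih (some x) (by intro a ha; cases ha; exact hx) hmem'
    | some m =>
      have hm : key1 m = key2 m := hacc m rfl
      simp only [List.foldl_cons, hx, hm]
      split_ifs with h
      · exact ih (some x) (by intro a ha; cases ha; exact hx) hmem'
      · exact ih (some m) (by intro a ha; cases ha; exact hm) hmem'

theorem min?_congr_mem {α : Type} (key1 key2 : α → Nat) (xs : List α)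
    (h : ∀ x ∈ xs, key1 x = key2 x) :
    PySem.List.min? xs key1 = PySem.List.min? xs key2 := by
  simp only [min?_eq_foldl]
  exact min?_foldl_congr key1 key2 xs none (by intro a ha; cases ha) h

-- a nonempty tag contained in m.lower() forces m ≠ ""
theorem matched_ne_empty (t m : String) (ht : t ≠ "")
    (h : PySem.Str.isIn t (PySem.Str.lower m) = true) : m ≠ "" := by
  intro hm
  subst hm
  have h2 := (PySem.Str.isIn_iff_infix t (PySem.Str.lower "")).mp h
  have h3 : t.toList <:+: ([] : List Char) := by simpa [PySem.Chars.lower] using h2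
  have : t.toList = [] := List.eq_nil_of_infix_nil h3
  exact ht (by cases t; simp_all)

-- main bridge: A's tag loop equals min? by the rank key, for any list of nonempty tags
theorem pickLoopA_eq_min? (models : List String) (hne : models ≠ []) :
    ∀ (ts : List String), (∀ t ∈ ts, t ≠ "") →
      pickLoopA models ts = PySem.List.min? models (rankB ts) := by
  intro ts
  induction ts with
  | nil =>
    intro _
    cases models with
    | nil => exact absurd rfl hne
    | cons m rest =>
      have hkey : ∀ x : String, rankB [] x = 0 := fun x => rfl
      simp only [pickLoopA, min?_eq_foldl, List.foldl_cons]
      have := foldl_keep_zero (rankB ([] : List String)) m (hkey m) rest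
      have h0 : PySem.List.pyGet? (m :: rest) 0 = some m := by
        simp [PySem.List.pyGet?, PySem.List.pyIdx?]
      rw [h0]
      exact this.symm
  | cons t ts' ih =>
    intro hts
    have ht : t ≠ "" := hts t (List.mem_cons_self ..)
    have hts' : ∀ u ∈ ts', u ≠ "" := fun u hu => hts u (List.mem_cons_of_mem _ hu)
    simp only [pickLoopA]
    cases hfind : models.find? (fun m => PySem.Str.isIn t (PySem.Str.lower m)) with
    | some m₀ =>
      have hp : PySem.Str.isIn t (PySem.Str.lower m₀) = true := by
        simpa using List.find?_some hfind
      have hne0 : m₀ ≠ "" := matched_ne_empty t m₀ ht hp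
      simp only [hne0, if_true, ne_eq, not_false_iff]
      have hfz : models.find? (fun x => rankB (t :: ts') x == 0) = some m₀ := by
        have hfun : (fun x => rankB (t :: ts') x == 0)
            = (fun m => PySem.Str.isIn t (PySem.Str.lower m)) := by
          funext x
          rw [rankB_cons]
          by_cases hx : PySem.Str.isIn t (PySem.Str.lower x) = true
          · rw [if_pos hx, hx]; rfl
          · have hx' : PySem.Str.isIn t (PySem.Str.lower x) = false := by simpa using hx
            rw [if_neg hx, hx']; simp
        rw [hfun]; exact hfind
      rw [min?_eq_foldl]
      exact (min?_of_find?_zero (rankB (t :: ts')) models none m₀ (by intro a ha; cases ha) hfz).symm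
    | none =>
      rw [ih hts']
      have hnomatch : ∀ m ∈ models, PySem.Str.isIn t (PySem.Str.lower m) = false := by
        intro m hm
        have := List.find?_eq_none.mp hfind m hm
        simpa using this
      have hkeys : ∀ x ∈ models, rankB (t :: ts') x = rankB ts' x + 1 := by
        intro x hx
        rw [rankB_cons, hnomatch x hx]
        simp
      rw [min?_congr_mem (rankB (t :: ts')) (fun x => rankB ts' x + 1) models hkeys,
        min?_succ_key]

-- ===== VERDICT (by name: the statement is the Claim_ definition above) =====
theorem pick_code_py_spec : Claim_equal_pick_code_py := by
  intro models _
  unfold Spec_pick_code_py pick_code_py pick_code_py_alt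
  by_cases h : models = []
  · simp [h]
  · simp only [h, if_false]
    exact pickLoopA_eq_min? models h _ (by decide)
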